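-- pv_equiv track=rewrite | github.com/joe-rabbit/hackathon | tamagochi/app_raw_ansi.py | sprite_rows
-- ===== SOURCE A (Python) =====
-- def sprite_rows(mood: str, blinking: bool, jumping: bool) -> list[str]:
--     """Generate Mochi sprite rows based on mood."""
--     left_eye = "D"
--     right_eye = "d"
--     mouth = "M"
--     body = "B"
--     shine = "P"
--     cheek = "C"
--     arms = "A"
--
--     if mood in ("sleeping", "sleepy") or blinking:
--         left_eye = "L"
--         right_eye = "l"
--     if mood == "happy" or mood == "excited":
--         left_eye = "H"
--         right_eye = "h"
--     if mood == "warning" or mood == "hot":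
--         left_eye = "S"
--         right_eye = "s"
--         body = "Q"
--     if mood == "thinking":
--         left_eye = "T"
--         right_eye = "t"
--     if mood == "sick" or mood == "error":
--         left_eye = "Y"
--         right_eye = "y"
--         body = "G"
--
--     template = [
--         "......BBBB......",
--         "....BBBBBBBB....",
--         "..BBBBBBBBBBBB..",
--         ".BPBBBBBBBBBBBB.",
--         ".BBBCBEBBIBCBBB.",
--         "..BBBB.MM.BBBB..",
--         "...BBBBBBBBBB...",
--         "....BBBBBBBB....",
--         "...AABBBBBBAA...",
--     ]
--
--     translated = []
--     for row in template:
--         row = (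
--             row.replace("P", shine)
--             .replace("C", cheek)
--             .replace("A", arms)
--             .replace("B", body)
--             .replace("E", left_eye)
--             .replace("I", right_eye)
--             .replace("M", mouth)
--         )
--         translated.append(row)
--     return translated
-- ===== SOURCE B (Python) =====
-- # Run-length-encoded sprite: each row is a list of (glyph, count) runs.
-- # Rows are synthesized by expanding runs, substituting the three mood-dependent
-- # glyphs (E = left eye, I = right eye, B = body) at the run level; no template
-- # string is ever scanned or replaced.
-- RLE = [
--     [(".", 6), ("B", 4), (".", 6)],
--     [(".", 4), ("B", 8), (".", 4)],
--     [(".", 2), ("B", 12), (".", 2)],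
--     [(".", 1), ("B", 1), ("P", 1), ("B", 12), (".", 1)],
--     [(".", 1), ("B", 3), ("C", 1), ("B", 1), ("E", 1), ("B", 2),
--      ("I", 1), ("B", 1), ("C", 1), ("B", 3), (".", 1)],
--     [(".", 2), ("B", 4), (".", 1), ("M", 2), (".", 1), ("B", 4), (".", 2)],
--     [(".", 3), ("B", 10), (".", 3)],
--     [(".", 4), ("B", 8), (".", 4)],
--     [(".", 3), ("A", 2), ("B", 6), ("A", 2), (".", 3)],
-- ]
--
-- MOODS = {
--     "happy": ("H", "h", "B"),
--     "excited": ("H", "h", "B"),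
--     "warning": ("S", "s", "Q"),
--     "hot": ("S", "s", "Q"),
--     "thinking": ("T", "t", "B"),
--     "sick": ("Y", "y", "G"),
--     "error": ("Y", "y", "G"),
-- }
--
--
-- def sprite_rows(mood: str, blinking: bool, jumping: bool) -> list[str]:
--     """Generate Mochi sprite rows based on mood."""
--     if mood in MOODS:
--         left_eye, right_eye, body = MOODS[mood]
--     elif blinking or mood in ("sleeping", "sleepy"):
--         left_eye, right_eye, body = "L", "l", "B"
--     else:
--         left_eye, right_eye, body = "D", "d", "B"
--     glyphs = {"E": left_eye, "I": right_eye, "B": body}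
--     return ["".join(glyphs.get(g, g) * n for g, n in runs) for runs in RLE]
-- ===== Notes on version B (the rewrite author's own statement) =====
-- stated objective: alternative
-- what changed: B stores the sprite as run-length-encoded (glyph,count) rows and synthesizes each output row by expanding runs with mood glyphs substituted per run, instead of A's chained str.replace passes over literal template strings; the five-branch if-cascade becomes one mood->(eyes,body) table lookup with a blinking/default fallback.
import Mathlib
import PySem

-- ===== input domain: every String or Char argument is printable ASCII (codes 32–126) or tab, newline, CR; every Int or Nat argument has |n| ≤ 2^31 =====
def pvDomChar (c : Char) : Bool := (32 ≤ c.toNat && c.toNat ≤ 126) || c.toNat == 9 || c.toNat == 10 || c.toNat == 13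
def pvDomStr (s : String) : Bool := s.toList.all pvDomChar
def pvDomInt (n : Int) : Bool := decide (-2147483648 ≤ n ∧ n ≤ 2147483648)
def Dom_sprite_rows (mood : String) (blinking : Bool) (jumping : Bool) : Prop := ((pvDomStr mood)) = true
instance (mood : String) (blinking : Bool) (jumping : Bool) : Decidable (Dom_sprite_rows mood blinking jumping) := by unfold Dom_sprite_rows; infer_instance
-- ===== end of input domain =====

-- B synthesizes each row by expanding a run-length-encoded (glyph,count) sprite with the
-- mood glyphs substituted per run, instead of A's seven chained .replace passes (alternative).

-- ===== PORT A =====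
def sprite_rows (mood : String) (blinking : Bool) (jumping : Bool) : List String :=
  let left_eye := "D"
  let right_eye := "d"
  let mouth := "M"
  let body := "B"
  let shine := "P"
  let cheek := "C"
  let arms := "A"
  let (left_eye, right_eye) :=
    if (mood == "sleeping" || mood == "sleepy") || blinking then ("L", "l")
    else (left_eye, right_eye)
  let (left_eye, right_eye) :=
    if mood == "happy" || mood == "excited" then ("H", "h") else (left_eye, right_eye)
  let (left_eye, right_eye, body) :=
    if mood == "warning" || mood == "hot" then ("S", "s", "Q") else (left_eye, right_eye, body)
  let (left_eye, right_eye) :=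
    if mood == "thinking" then ("T", "t") else (left_eye, right_eye)
  let (left_eye, right_eye, body) :=
    if mood == "sick" || mood == "error" then ("Y", "y", "G") else (left_eye, right_eye, body)
  let template : List String :=
    [ "......BBBB......",
      "....BBBBBBBB....",
      "..BBBBBBBBBBBB..",
      ".BPBBBBBBBBBBBB.",
      ".BBBCBEBBIBCBBB.",
      "..BBBB.MM.BBBB..",
      "...BBBBBBBBBB...",
      "....BBBBBBBB....",
      "...AABBBBBBAA..." ]
  template.foldl
    (fun translated row =>
      translated ++
        [PySem.Str.replace
          (PySem.Str.replace
            (PySem.Str.replace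
              (PySem.Str.replace
                (PySem.Str.replace
                  (PySem.Str.replace
                    (PySem.Str.replace row "P" shine) "C" cheek) "A" arms) "B" body)
              "E" left_eye) "I" right_eye) "M" mouth])
    []

-- ===== PORT B =====
-- B-side helper: the module-level RLE constant (rows as (glyph, count) runs)
def pvRleB : List (List (Char × Nat)) :=
  [ [('.', 6), ('B', 4), ('.', 6)],
    [('.', 4), ('B', 8), ('.', 4)],
    [('.', 2), ('B', 12), ('.', 2)],
    [('.', 1), ('B', 1), ('P', 1), ('B', 12), ('.', 1)],
    [('.', 1), ('B', 3), ('C', 1), ('B', 1), ('E', 1), ('B', 2),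
     ('I', 1), ('B', 1), ('C', 1), ('B', 3), ('.', 1)],
    [('.', 2), ('B', 4), ('.', 1), ('M', 2), ('.', 1), ('B', 4), ('.', 2)],
    [('.', 3), ('B', 10), ('.', 3)],
    [('.', 4), ('B', 8), ('.', 4)],
    [('.', 3), ('A', 2), ('B', 6), ('A', 2), ('.', 3)] ]

-- B-side helper: the module-level MOODS dict
def pvMoodsB : PySem.Dict String (String × String × String) :=
  PySem.Dict.ofList
    [ ("happy", ("H", "h", "B")), ("excited", ("H", "h", "B")),
      ("warning", ("S", "s", "Q")), ("hot", ("S", "s", "Q")),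
      ("thinking", ("T", "t", "B")),
      ("sick", ("Y", "y", "G")), ("error", ("Y", "y", "G")) ]

def sprite_rows_alt (mood : String) (blinking : Bool) (jumping : Bool) : List String :=
  let (left_eye, right_eye, body) :=
    match pvMoodsB.get? mood with
    | some t => t
    | none =>
        if blinking || (mood == "sleeping" || mood == "sleepy") then ("L", "l", "B")
        else ("D", "d", "B")
  let glyphs : PySem.Dict Char String :=
    PySem.Dict.ofList [('E', left_eye), ('I', right_eye), ('B', body)]
  pvRleB.map (fun runs =>
    String.mk (runs.flatMap (fun gn =>
      (List.replicate gn.2 (glyphs.getD gn.1 (String.mk [gn.1])).toList).flatten)))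

-- ===== PRECONDITION & SPEC =====
def Spec_sprite_rows (mood : String) (blinking : Bool) (jumping : Bool) (out : List String) : Prop := out = sprite_rows_alt mood blinking jumping
instance (mood : String) (blinking : Bool) (jumping : Bool) (out : List String) : Decidable (Spec_sprite_rows mood blinking jumping out) := by unfold Spec_sprite_rows; infer_instance

-- ===== CLAIM (what is proved, stated in full; the proofs are below) =====
def Claim_equal_sprite_rows : Prop := ∀ (mood : String) (blinking : Bool) (jumping : Bool), Dom_sprite_rows mood blinking jumping → Spec_sprite_rows mood blinking jumping (sprite_rows mood blinking jumping)

-- ===== LEMMAS AND PROOFS =====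

-- ===== VERDICT (by name: the statement is the Claim_ definition above) =====
set_option maxHeartbeats 4000000 in
theorem sprite_rows_spec : Claim_equal_sprite_rows := by
  intro mood blinking jumping _
  unfold Spec_sprite_rows
  by_cases h1 : mood = "sleeping"; · subst h1; cases blinking <;> cases jumping <;> decide
  by_cases h2 : mood = "sleepy";   · subst h2; cases blinking <;> cases jumping <;> decide
  by_cases h3 : mood = "happy";    · subst h3; cases blinking <;> cases jumping <;> decide
  by_cases h4 : mood = "excited";  · subst h4; cases blinking <;> cases jumping <;> decide
  by_cases h5 : mood = "warning";  · subst h5; cases blinking <;> cases jumping <;> decide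
  by_cases h6 : mood = "hot";      · subst h6; cases blinking <;> cases jumping <;> decide
  by_cases h7 : mood = "thinking"; · subst h7; cases blinking <;> cases jumping <;> decide
  by_cases h8 : mood = "sick";     · subst h8; cases blinking <;> cases jumping <;> decide
  by_cases h9 : mood = "error";    · subst h9; cases blinking <;> cases jumping <;> decide
  have e : ∀ s : String, mood ≠ s → (mood == s) = false := fun s hs => beq_eq_false_iff_ne.mpr hs
  have e' : ∀ s : String, s ≠ mood → (s == mood) = false := fun s hs => beq_eq_false_iff_ne.mpr hs
  have hM : pvMoodsB = PySem.Dict.mk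
      [ ("happy", ("H", "h", "B")), ("excited", ("H", "h", "B")),
        ("warning", ("S", "s", "Q")), ("hot", ("S", "s", "Q")),
        ("thinking", ("T", "t", "B")),
        ("sick", ("Y", "y", "G")), ("error", ("Y", "y", "G")) ] := by decide
  simp only [sprite_rows, sprite_rows_alt, hM,
    e _ h1, e _ h2, e _ h3, e _ h4, e _ h5, e _ h6, e _ h7, e _ h8, e _ h9,
    e' _ (Ne.symm h1), e' _ (Ne.symm h2), e' _ (Ne.symm h3), e' _ (Ne.symm h4),
    e' _ (Ne.symm h5), e' _ (Ne.symm h6), e' _ (Ne.symm h7), e' _ (Ne.symm h8),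
    e' _ (Ne.symm h9),
    Bool.false_or, Bool.or_false, if_false, Bool.false_eq_true, PySem.Dict.get?, List.find?]
  cases blinking <;> cases jumping <;> decide
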